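-- pv_equiv track=rewrite | github.com/11char/coding_practice | 2025/Sept/Disappearing Floor (Kakao 2022 Blind Recruitment).py | solution
-- ===== SOURCE A (Python) =====
-- def solution(board, aloc, bloc):
--     X, Y = len(board), len(board[0])
--
--     #mask for better & easier access to board
--     mask = 0
--     for x in range(X):
--         for y in range(Y):
--             if board[x][y]:
--                 mask |= 1<<x*Y+y
--
--     answer = -1
--
--     def in_board(x, y):
--         return 0 <= x < X and 0 <= y < Y
--
--     def has_tile(msk, x, y):
--         return (msk>>x*Y+y) & 1
--
--     def clear_tile(msk, x, y):
--         return msk & ~(1<<x*Y+y)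
--
--
--     DIRS = [(1,0), (-1,0), (0,1), (0,-1)]
--
--     def dfs(ax, ay, bx, by, msk):
--         if not has_tile(msk,ax, ay):
--             return (False, 0)
--         can_move = False
--         win_turns = float('inf')
--         lose_turns = 0
--
--         for dx, dy in DIRS:
--             nx, ny = ax + dx, ay + dy
--             if not in_board(nx,ny) or not has_tile(msk,nx,ny):
--                 continue
--
--             can_move = True
--
--             new_mask = clear_tile(msk,ax,ay)
--             #next turn: flip turn, new mask new loc
--             opp_win, turns = dfs(bx, by, nx, ny, new_mask)
--
--             if not opp_win:
--                 win_turns = min(win_turns, turns + 1)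
--             else:
--                 lose_turns = max(lose_turns, turns + 1)
--
--         if (not can_move):
--             return (False, 0)
--         if (win_turns != float('inf')):
--             return (True, win_turns)
--         else:
--             return (False,lose_turns)
--
--     _, answer = dfs(aloc[0], aloc[1], bloc[0], bloc[1], mask)
--
--     return answer
-- ===== SOURCE B (Python) =====
-- def solution(board, aloc, bloc):
--     R, C = len(board), len(board[0])
--
--     full = 0
--     for i, row in enumerate(board):
--         for j in range(C):
--             if row[j]:
--                 full |= 1 << (i * C + j)
--
--     cache = {}
--
--     # game(cur, opp, msk) returns a single signed value v:
--     #   v > 0  : the player to move (at cur) wins, the game lasts v more moves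
--     #   v <= 0 : the player to move loses, the game lasts -v more moves
--     def game(cx, cy, ox, oy, msk):
--         if not (msk >> (cx * C + cy)) & 1:
--             return 0
--         key = (cx, cy, ox, oy, msk)
--         if key not in cache:
--             rest = msk & ~(1 << (cx * C + cy))
--             outcomes = [game(ox, oy, nx, ny, rest)
--                         for nx, ny in ((cx + 1, cy), (cx - 1, cy), (cx, cy + 1), (cx, cy - 1))
--                         if 0 <= nx < R and 0 <= ny < C and (msk >> (nx * C + ny)) & 1]
--             losses = [v for v in outcomes if v <= 0]
--             if losses:
--                 cache[key] = 1 - max(losses)          # win as fast as possible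
--             elif outcomes:
--                 cache[key] = -(max(outcomes) + 1)     # lose as slowly as possible
--             else:
--                 cache[key] = 0                        # stuck: lose immediately
--         return cache[key]
--
--     return abs(game(aloc[0], aloc[1], bloc[0], bloc[1], full))
-- ===== Notes on version B (the rewrite author's own statement) =====
-- stated objective: alternative
-- what changed: B memoizes the game search in a dict keyed by the full state (cx, cy, ox, oy, mask) so each distinct state is solved once, and replaces A's (win, turns) pairs with three loop accumulators by a single signed game value (positive = mover wins in v moves, non-positive = loses in -v moves) combined from a list of child outcomes by filter/max.
import Mathlib
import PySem

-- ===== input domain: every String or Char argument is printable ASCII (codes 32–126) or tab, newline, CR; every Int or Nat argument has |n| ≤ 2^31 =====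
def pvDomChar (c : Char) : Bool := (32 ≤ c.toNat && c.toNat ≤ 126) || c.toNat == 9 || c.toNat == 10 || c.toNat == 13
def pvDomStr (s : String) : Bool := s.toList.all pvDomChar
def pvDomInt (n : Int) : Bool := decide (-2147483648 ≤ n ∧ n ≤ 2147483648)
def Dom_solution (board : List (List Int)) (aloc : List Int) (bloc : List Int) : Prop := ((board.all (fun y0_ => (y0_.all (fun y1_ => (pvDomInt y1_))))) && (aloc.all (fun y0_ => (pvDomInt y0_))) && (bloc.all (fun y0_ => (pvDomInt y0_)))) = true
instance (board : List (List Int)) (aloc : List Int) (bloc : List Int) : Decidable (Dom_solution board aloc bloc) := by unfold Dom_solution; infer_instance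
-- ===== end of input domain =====

-- B memoizes the game search (one dict entry per distinct state) and replaces A's
-- (win : bool, turns) pairs and three loop accumulators by a single signed game value
-- combined from a list of child outcomes; return values agree on Pre_ (the inputs
-- where the Python A raises no exception).

-- ===== PORT A =====
-- A's nested dfs captures X and Y; the ports pass them explicitly.
-- Recursion is fueled (Python recursion has no fuel): each recursive call clears a set bit
-- of msk, so msk strictly decreases and the initial fuel mask+1 is never exhausted.

def pvInB (X Y x y : Int) : Bool :=
  decide (0 ≤ x ∧ x < X ∧ 0 ≤ y ∧ y < Y)

-- (msk >> (x*Y+y)) & 1; Python raises ValueError on a negative shift (excluded by Pre_), modelled as false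
def pvHasA (Y : Int) (msk : Nat) (x y : Int) : Bool :=
  if x * Y + y < 0 then false else msk.testBit (x * Y + y).toNat

-- msk & ~(1 << (x*Y+y)) on a nonnegative msk = clear that bit (exact); negative shift raises in Python (excluded by Pre_)
def pvClearA (Y : Int) (msk : Nat) (x y : Int) : Nat :=
  if x * Y + y < 0 then msk
  else if msk.testBit (x * Y + y).toNat then msk - 2 ^ (x * Y + y).toNat else msk

-- the mask-building double loop; the .getD defaults are unreachable (x < X, y < Y ≤ row length under Pre_)
def pvMaskA (board : List (List Int)) (X Y : Int) : Nat :=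
  (PySem.List.pyRange 0 X 1).foldl (fun m x =>
    (PySem.List.pyRange 0 Y 1).foldl (fun m y =>
      if (PySem.List.pyGet? ((PySem.List.pyGet? board x).getD []) y).getD 0 ≠ 0
      then m ||| 2 ^ (x * Y + y).toNat else m) m) 0

-- win_turns = float('inf') is modelled as none; pvMinO is min(win_turns, v)
def pvMinO (o : Option Int) (v : Int) : Option Int :=
  match o with
  | none => some v
  | some w => some (min w v)

def pvDIRS : List (Int × Int) := [(1, 0), (-1, 0), (0, 1), (0, -1)]

-- one iteration of A's `for dx, dy in DIRS` loop; acc = (can_move, win_turns, lose_turns),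
-- v nx ny = dfs(bx, by, nx, ny, new_mask)
def pvStepA (X Y ax ay : Int) (msk : Nat) (v : Int → Int → Bool × Int)
    (acc : Bool × Option Int × Int) (d : Int × Int) : Bool × Option Int × Int :=
  let nx := ax + d.1
  let ny := ay + d.2
  if !(pvInB X Y nx ny) || !(pvHasA Y msk nx ny) then acc
  else
    let r := v nx ny
    if r.1 = false then (true, pvMinO acc.2.1 (r.2 + 1), acc.2.2)
    else (true, acc.2.1, max acc.2.2 (r.2 + 1))

def pvDfsA (X Y : Int) : Nat → Int → Int → Int → Int → Nat → Bool × Int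
  | 0, _, _, _, _, _ => (false, 0)      -- fuel exhausted: unreachable from fuel mask+1
  | fuel + 1, ax, ay, bx, b_y, msk =>
    if pvHasA Y msk ax ay = false then (false, 0)
    else
      let acc := pvDIRS.foldl
        (pvStepA X Y ax ay msk (fun nx ny =>
          pvDfsA X Y fuel bx b_y nx ny (pvClearA Y msk ax ay)))   -- new_mask = clear_tile(msk, ax, ay)
        (false, none, 0)
      if acc.1 = false then (false, 0)
      else
        match acc.2.1 with
        | some w => (true, w)           -- win_turns != inf
        | none => (false, acc.2.2)

def solution (board : List (List Int)) (aloc : List Int) (bloc : List Int) : Int :=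
  let X : Int := (board.length : Int)
  let Y : Int := (((PySem.List.pyGet? board 0).getD []).length : Int)  -- len(board[0]); board ≠ [] under Pre_
  let mask := pvMaskA board X Y
  let a0 := (PySem.List.pyGet? aloc 0).getD 0   -- aloc[0]; in range under Pre_
  let a1 := (PySem.List.pyGet? aloc 1).getD 0
  let b0 := (PySem.List.pyGet? bloc 0).getD 0
  let b1 := (PySem.List.pyGet? bloc 1).getD 0
  (pvDfsA X Y (mask + 1) a0 a1 b0 b1 mask).2

-- ===== PORT B =====
-- Source B: memo dict keyed by the full state; game returns ONE signed Int
-- (v > 0: mover wins after v moves, v ≤ 0: mover loses after -v moves);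
-- child outcomes are collected in a list and combined by filter/max.

abbrev PvMemoB := PySem.Dict (Int × Int × Int × Int × Nat) Int

-- (msk >> (cx*C+cy)) & 1; a negative shift raises in Python (excluded by Pre_), modelled as false
def pvTileB (C : Int) (msk : Nat) (x y : Int) : Bool :=
  decide (0 ≤ x * C + y) && Nat.testBit msk (x * C + y).toNat

-- msk & ~(1 << (cx*C+cy)): subtract the bit if present
def pvDropB (C : Int) (msk : Nat) (x y : Int) : Nat :=
  msk - (if pvTileB C msk x y then 2 ^ (x * C + y).toNat else 0)

-- `for i, row in enumerate(board): for j in range(C): ...`; row[j] in range under Pre_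
def pvMaskB (board : List (List Int)) (C : Int) : Nat :=
  (PySem.List.enumerate board).foldl (fun m p =>
    (PySem.List.pyRange 0 C 1).foldl (fun m j =>
      if (PySem.List.pyGet? p.2 j).getD 0 ≠ 0 then m ||| 2 ^ (p.1 * C + j).toNat else m) m) 0

def pvGameB (R C : Int) : Nat → PvMemoB → Int → Int → Int → Int → Nat → PvMemoB × Int
  | 0, m, _, _, _, _, _ => (m, 0)       -- fuel exhausted: unreachable from fuel full+1
  | fuel + 1, m, cx, cy, ox, oy, msk =>
    if pvTileB C msk cx cy = false then (m, 0)     -- returned before the cache is consulted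
    else
      match m.get? (cx, cy, ox, oy, msk) with
      | some v => (m, v)
      | none =>
        let rest := pvDropB C msk cx cy
        -- the list comprehension over the four candidate squares, threading the cache
        let p := [(cx + 1, cy), (cx - 1, cy), (cx, cy + 1), (cx, cy - 1)].foldl
          (fun (acc : PvMemoB × List Int) q =>
            if decide (0 ≤ q.1 ∧ q.1 < R ∧ 0 ≤ q.2 ∧ q.2 < C) && pvTileB C msk q.1 q.2 then
              let r := pvGameB R C fuel acc.1 ox oy q.1 q.2 rest
              (r.1, acc.2 ++ [r.2])
            else acc) (m, [])
        let losses := p.2.filter (fun v => decide (v ≤ 0))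
        let v : Int :=
          if losses.isEmpty = false then 1 - ((PySem.List.max? losses (fun x => x)).getD 0)
          else if p.2.isEmpty = false then -(((PySem.List.max? p.2 (fun x => x)).getD 0) + 1)
          else 0
        (p.1.insert (cx, cy, ox, oy, msk) v, v)

def solution_alt (board : List (List Int)) (aloc : List Int) (bloc : List Int) : Int :=
  let R : Int := (board.length : Int)
  let C : Int := (((PySem.List.pyGet? board 0).getD []).length : Int)
  let full := pvMaskB board C
  let a0 := (PySem.List.pyGet? aloc 0).getD 0
  let a1 := (PySem.List.pyGet? aloc 1).getD 0
  let b0 := (PySem.List.pyGet? bloc 0).getD 0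
  let b1 := (PySem.List.pyGet? bloc 1).getD 0
  |(pvGameB R C (full + 1) PySem.Dict.empty a0 a1 b0 b1 full).2|

-- ===== PRECONDITION & SPEC =====
-- Pre_ admits exactly the inputs on which the Python A RETURNS; it excludes only inputs on
-- which A raises: IndexError from an empty board, a row shorter than board[0] or a location
-- list shorter than 2 entries, and ValueError from a negative shift amount.  A shifts by the
-- mover's index aloc[0]*Y+aloc[1] immediately, but by bloc's index only after player A has
-- actually made a move — hence the disjunction: a negative bloc index is fine (never
-- evaluated, A returns 0) when A's starting square has no tile or no live neighbour.

-- whether mask bit i (i ≥ 0) is set, read back from the board: i = q*Y + r with 0 ≤ r < Y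
def pvPreTile (board : List (List Int)) (X Y i : Int) : Prop :=
  0 < Y ∧ i / Y < X ∧ ((board.getD (i / Y).toNat []).getD (i % Y).toNat 0) ≠ 0

def Pre_solution (board : List (List Int)) (aloc : List Int) (bloc : List Int) : Prop :=
  let X : Int := (board.length : Int)
  let Y : Int := ((board.headD []).length : Int)
  let a0 := aloc.getD 0 0
  let a1 := aloc.getD 1 0
  let b0 := bloc.getD 0 0
  let b1 := bloc.getD 1 0
  board ≠ [] ∧
  (∀ row ∈ board, Y ≤ (row.length : Int)) ∧
  2 ≤ aloc.length ∧ 2 ≤ bloc.length ∧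
  0 ≤ a0 * Y + a1 ∧
  (0 ≤ b0 * Y + b1 ∨
    -- bloc's index is never shifted: A's first player has no tile or cannot move
    ¬ (pvPreTile board X Y (a0 * Y + a1) ∧
       ((0 ≤ a0 + 1 ∧ a0 + 1 < X ∧ 0 ≤ a1 ∧ a1 < Y ∧ pvPreTile board X Y ((a0 + 1) * Y + a1)) ∨
        (0 ≤ a0 - 1 ∧ a0 - 1 < X ∧ 0 ≤ a1 ∧ a1 < Y ∧ pvPreTile board X Y ((a0 - 1) * Y + a1)) ∨
        (0 ≤ a0 ∧ a0 < X ∧ 0 ≤ a1 + 1 ∧ a1 + 1 < Y ∧ pvPreTile board X Y (a0 * Y + (a1 + 1))) ∨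
        (0 ≤ a0 ∧ a0 < X ∧ 0 ≤ a1 - 1 ∧ a1 - 1 < Y ∧ pvPreTile board X Y (a0 * Y + (a1 - 1))))))

instance (board : List (List Int)) (aloc : List Int) (bloc : List Int) : Decidable (Pre_solution board aloc bloc) := by
  unfold Pre_solution pvPreTile; infer_instance

def pvWitness_solution : List (List Int) × List Int × List Int := ([[1, 1], [1, 1]], [0, 0], [1, 1])

def Spec_solution (board : List (List Int)) (aloc : List Int) (bloc : List Int) (out : Int) : Prop := out = solution_alt board aloc bloc
instance (board : List (List Int)) (aloc : List Int) (bloc : List Int) (out : Int) : Decidable (Spec_solution board aloc bloc out) := by unfold Spec_solution; infer_instance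

-- ===== CLAIM (what is proved, stated in full; the proofs are below) =====
def Claim_equal_solution : Prop := ∀ (board : List (List Int)) (aloc : List Int) (bloc : List Int), Dom_solution board aloc bloc → Pre_solution board aloc bloc → Spec_solution board aloc bloc (solution board aloc bloc)

-- ===== LEMMAS AND PROOFS =====

-- B's helpers compute the same bit tests as A's
theorem pvTileB_eq (C : Int) (msk : Nat) (x y : Int) : pvTileB C msk x y = pvHasA C msk x y := by
  unfold pvTileB pvHasA
  by_cases h : x * C + y < 0
  · simp [h, show ¬ (0 ≤ x * C + y) by omega]
  · simp [h, show 0 ≤ x * C + y by omega]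

theorem pvDropB_eq (C : Int) (msk : Nat) (x y : Int) : pvDropB C msk x y = pvClearA C msk x y := by
  unfold pvDropB pvClearA
  rw [pvTileB_eq]
  unfold pvHasA
  by_cases h : x * C + y < 0
  · simp [h]
  · by_cases ht : msk.testBit (x * C + y).toNat <;> simp [h, ht]

theorem pvMaskB_eq (board : List (List Int)) (C : Int) :
    pvMaskB board C = pvMaskA board (board.length : Int) C := by
  unfold pvMaskB pvMaskA
  rw [PySem.List.enumerate_eq_map_pyRange board ([] : List Int), List.foldl_map,
    PySem.List.len_eq]
  rfl

theorem pvClearA_lt (Y : Int) (msk : Nat) (x y : Int) (h : pvHasA Y msk x y = true) :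
    pvClearA Y msk x y < msk := by
  unfold pvHasA at h
  unfold pvClearA
  split
  · simp_all
  · rw [if_neg (by simp_all)] at h
    rw [if_pos h]
    have hm : 0 < msk := by
      rcases Nat.eq_zero_or_pos msk with h0 | h0
      · subst h0; simp [Nat.zero_testBit] at h
      · exact h0
    exact Nat.sub_lt hm (Nat.two_pow_pos _)

theorem pvFoldlInv {α β : Type} (P : α → Prop) (f : α → β → α) :
    ∀ (l : List β) (a : α), P a → (∀ a b, P a → P (f a b)) → P (l.foldl f a) := by
  intro l
  induction l with
  | nil => intro a h _; simpa using h
  | cons b t ih => intro a h hs; simpa using ih (f a b) (hs a b h) hs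

-- reductions of one iteration of A's loop, per case
theorem pvStepA_skip (X Y ax ay : Int) (msk : Nat) (v : Int → Int → Bool × Int)
    (cA : Bool) (wA : Option Int) (lA : Int) (d : Int × Int)
    (h : (pvInB X Y (ax + d.1) (ay + d.2) && pvHasA Y msk (ax + d.1) (ay + d.2)) = false) :
    pvStepA X Y ax ay msk v (cA, wA, lA) d = (cA, wA, lA) := by
  cases hA : pvInB X Y (ax + d.1) (ay + d.2) <;>
    cases hB : pvHasA Y msk (ax + d.1) (ay + d.2) <;>
    simp_all [pvStepA]

theorem pvStepA_win (X Y ax ay : Int) (msk : Nat) (v : Int → Int → Bool × Int)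
    (cA : Bool) (wA : Option Int) (lA : Int) (d : Int × Int)
    (h : (pvInB X Y (ax + d.1) (ay + d.2) && pvHasA Y msk (ax + d.1) (ay + d.2)) = true)
    (hb : (v (ax + d.1) (ay + d.2)).1 = false) :
    pvStepA X Y ax ay msk v (cA, wA, lA) d =
      (true, pvMinO wA ((v (ax + d.1) (ay + d.2)).2 + 1), lA) := by
  unfold pvStepA
  rw [if_neg (by simp_all), if_pos hb]

theorem pvStepA_lose (X Y ax ay : Int) (msk : Nat) (v : Int → Int → Bool × Int)
    (cA : Bool) (wA : Option Int) (lA : Int) (d : Int × Int)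
    (h : (pvInB X Y (ax + d.1) (ay + d.2) && pvHasA Y msk (ax + d.1) (ay + d.2)) = true)
    (hb : (v (ax + d.1) (ay + d.2)).1 = true) :
    pvStepA X Y ax ay msk v (cA, wA, lA) d =
      (true, wA, max lA ((v (ax + d.1) (ay + d.2)).2 + 1)) := by
  unfold pvStepA
  rw [if_neg (by simp_all), if_neg (by simp [hb])]

-- A's dfs returns turns ≥ 0, and ≥ 1 on a win
theorem pvDfsA_bounds (X Y : Int) :
    ∀ (f : Nat) (ax ay bx b_y : Int) (msk : Nat),
      0 ≤ (pvDfsA X Y f ax ay bx b_y msk).2 ∧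
      ((pvDfsA X Y f ax ay bx b_y msk).1 = true → 1 ≤ (pvDfsA X Y f ax ay bx b_y msk).2) := by
  intro f
  induction f with
  | zero => intro ax ay bx b_y msk; simp [pvDfsA]
  | succ f ih =>
    intro ax ay bx b_y msk
    simp only [pvDfsA]
    by_cases h : pvHasA Y msk ax ay = false
    · simp [h]
    · rw [if_neg h]
      have hinv : (fun acc : Bool × Option Int × Int =>
          (∀ w, acc.2.1 = some w → 1 ≤ w) ∧ 0 ≤ acc.2.2)
          (pvDIRS.foldl (pvStepA X Y ax ay msk (fun nx ny =>
            pvDfsA X Y f bx b_y nx ny (pvClearA Y msk ax ay))) (false, none, 0)) := by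
        apply pvFoldlInv (fun acc : Bool × Option Int × Int =>
          (∀ w, acc.2.1 = some w → 1 ≤ w) ∧ 0 ≤ acc.2.2)
        · exact ⟨by simp, le_refl 0⟩
        · intro a d ha
          obtain ⟨c, wo, lo⟩ := a
          have hr := (ih bx b_y (ax + d.1) (ay + d.2) (pvClearA Y msk ax ay)).1
          by_cases hc : (pvInB X Y (ax + d.1) (ay + d.2) && pvHasA Y msk (ax + d.1) (ay + d.2)) = true
          · rcases hb : (pvDfsA X Y f bx b_y (ax + d.1) (ay + d.2) (pvClearA Y msk ax ay)).1 with _ | _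
            · rw [pvStepA_win X Y ax ay msk _ c wo lo d hc hb]
              refine ⟨?_, ha.2⟩
              intro w hw
              simp only [pvMinO] at hw
              rcases h21 : wo with _ | w0
              · rw [h21] at hw; simp at hw; omega
              · rw [h21] at hw; simp at hw
                have := ha.1 w0 h21
                rw [← hw]; simp; constructor <;> omega
            · rw [pvStepA_lose X Y ax ay msk _ c wo lo d hc hb]
              refine ⟨ha.1, ?_⟩
              have := ha.2
              simp; right; omega
          · rw [pvStepA_skip X Y ax ay msk _ c wo lo d (by simpa using hc)]
            exact ha
      set acc := pvDIRS.foldl (pvStepA X Y ax ay msk (fun nx ny =>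
            pvDfsA X Y f bx b_y nx ny (pvClearA Y msk ax ay))) (false, none, 0) with hacc
      by_cases hc : acc.1 = false
      · simp [hc]
      · rw [if_neg hc]
        rcases hw : acc.2.1 with _ | w
        · constructor
          · simpa using hinv.2
          · simp
        · have h1 := hinv.1 w hw
          constructor
          · simp; omega
          · intro _; simpa using h1

theorem pvDfsA_fuel (X Y : Int) :
    ∀ (f g : Nat) (ax ay bx b_y : Int) (msk : Nat), msk < f → msk < g →
      pvDfsA X Y f ax ay bx b_y msk = pvDfsA X Y g ax ay bx b_y msk := by
  intro f
  induction f with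
  | zero => intro g ax ay bx b_y msk hf; omega
  | succ f ih =>
    intro g ax ay bx b_y msk hf hg
    cases g with
    | zero => omega
    | succ g =>
      simp only [pvDfsA]
      by_cases h : pvHasA Y msk ax ay = false
      · simp [h]
      · have hlt := pvClearA_lt Y msk ax ay (by simpa using h)
        have hv : (fun nx ny => pvDfsA X Y f bx b_y nx ny (pvClearA Y msk ax ay)) =
            (fun nx ny => pvDfsA X Y g bx b_y nx ny (pvClearA Y msk ax ay)) := by
          funext nx ny
          exact ih g bx b_y nx ny (pvClearA Y msk ax ay) (by omega) (by omega)
        rw [hv]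

-- the signed encoding of A's (win, turns) pair that B's game computes
def pvEnc (r : Bool × Int) : Int := if r.1 then r.2 else -r.2

-- A's dfs at its canonical (sufficient) fuel
def pvVal (X Y ax ay bx b_y : Int) (msk : Nat) : Bool × Int :=
  pvDfsA X Y (msk + 1) ax ay bx b_y msk

-- every memo entry carries the encoded value of A's dfs at that state
def pvInv (X Y : Int) (m : PvMemoB) : Prop :=
  ∀ ax ay bx b_y : Int, ∀ msk : Nat, ∀ r : Int,
    m.get? (ax, ay, bx, b_y, msk) = some r → r = pvEnc (pvVal X Y ax ay bx b_y msk)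

theorem pvInv_empty (X Y : Int) : pvInv X Y PySem.Dict.empty := by
  intro ax ay bx b_y msk r h
  simp [PySem.Dict.get?_empty] at h

theorem pvInv_insert (X Y : Int) (m : PvMemoB) (ax ay bx b_y : Int) (msk : Nat) (r : Int)
    (hm : pvInv X Y m) (hr : r = pvEnc (pvVal X Y ax ay bx b_y msk)) :
    pvInv X Y (m.insert (ax, ay, bx, b_y, msk) r) := by
  intro a b c d e r' h
  rw [PySem.Dict.get?_insert] at h
  split at h
  · rename_i heq
    obtain ⟨h1, h2, h3, h4, h5⟩ : a = ax ∧ b = ay ∧ c = bx ∧ d = b_y ∧ e = msk := by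
      simpa [Prod.ext_iff] using heq
    subst h1; subst h2; subst h3; subst h4; subst h5
    cases h; exact hr
  · exact hm a b c d e r' h

-- Python max over a nonempty list grown at the right end
theorem pvMax?_append (xs : List Int) (c : Int) :
    PySem.List.max? (xs ++ [c]) (fun x => x) =
      some (match PySem.List.max? xs (fun x => x) with | none => c | some m => max m c) := by
  cases xs with
  | nil => rfl
  | cons x t =>
    rw [List.cons_append, PySem.List.max?_id_cons, PySem.List.max?_id_cons]
    simp [List.foldl_append]

-- A's win_turns accumulator, recovered from B's outcome list
def pvWinOf (os : List Int) : Option Int :=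
  (PySem.List.max? (os.filter (fun v => decide (v ≤ 0))) (fun x => x)).map (fun c => 1 - c)

-- A's lose_turns accumulator, recovered from B's outcome list
def pvLoseOf (os : List Int) : Int :=
  match PySem.List.max? (os.filter (fun v => decide (0 < v))) (fun x => x) with
  | none => 0
  | some c => c + 1

theorem pvWinOf_append_le (os : List Int) (c : Int) (h : c ≤ 0) :
    pvWinOf (os ++ [c]) = pvMinO (pvWinOf os) (1 - c) := by
  unfold pvWinOf
  rw [List.filter_append]
  simp only [List.filter, decide_eq_true (by exact h : c ≤ 0)]
  rw [pvMax?_append]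
  rcases hm : PySem.List.max? (os.filter (fun v => decide (v ≤ 0))) (fun x => x) with _ | m
  · simp [pvMinO]
  · simp only [Option.map_some, pvMinO]
    have : (1 : Int) - max m c = min (1 - m) (1 - c) := by omega
    simp [this]

theorem pvWinOf_append_pos (os : List Int) (c : Int) (h : 0 < c) :
    pvWinOf (os ++ [c]) = pvWinOf os := by
  unfold pvWinOf
  rw [List.filter_append]
  simp [List.filter, decide_eq_false (by omega : ¬ c ≤ 0)]

theorem pvLoseOf_append_pos (os : List Int) (c : Int) (h : 0 < c) :
    pvLoseOf (os ++ [c]) = max (pvLoseOf os) (c + 1) := by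
  unfold pvLoseOf
  rw [List.filter_append]
  simp only [List.filter, decide_eq_true (by exact h : 0 < c)]
  rw [pvMax?_append]
  rcases hm : PySem.List.max? (os.filter (fun v => decide (0 < v))) (fun x => x) with _ | m
  · simp; omega
  · simp

theorem pvLoseOf_append_le (os : List Int) (c : Int) (h : c ≤ 0) :
    pvLoseOf (os ++ [c]) = pvLoseOf os := by
  unfold pvLoseOf
  rw [List.filter_append]
  simp [List.filter, decide_eq_false (by omega : ¬ 0 < c)]

-- the two loops, run side by side over the same direction list:
-- A keeps (can_move, win_turns, lose_turns), B keeps (memo, outcome list)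
theorem pvFoldAB (X Y ax ay : Int) (msk : Nat)
    (v : Int → Int → Bool × Int)
    (w : PvMemoB → Int → Int → PvMemoB × Int)
    (hv : ∀ nx ny, 0 ≤ (v nx ny).2 ∧ ((v nx ny).1 = true → 1 ≤ (v nx ny).2))
    (hw : ∀ m nx ny, pvInv X Y m → (w m nx ny).2 = pvEnc (v nx ny) ∧ pvInv X Y (w m nx ny).1) :
    ∀ (l : List (Int × Int)) (m : PvMemoB) (os : List Int) (cA : Bool) (wA : Option Int) (lA : Int),
      pvInv X Y m → cA = !os.isEmpty → wA = pvWinOf os → lA = pvLoseOf os →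
      (let bacc := l.foldl (fun (acc : PvMemoB × List Int) d =>
          if (pvInB X Y (ax + d.1) (ay + d.2) && pvHasA Y msk (ax + d.1) (ay + d.2)) then
            (w acc.1 (ax + d.1) (ay + d.2)).1 |> fun m' =>
              (m', acc.2 ++ [(w acc.1 (ax + d.1) (ay + d.2)).2])
          else acc) (m, os)
       let aacc := l.foldl (pvStepA X Y ax ay msk v) (cA, wA, lA)
       pvInv X Y bacc.1 ∧ aacc.1 = !bacc.2.isEmpty ∧ aacc.2.1 = pvWinOf bacc.2 ∧
         aacc.2.2 = pvLoseOf bacc.2) := by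
  intro l
  induction l with
  | nil =>
    intro m os cA wA lA hm hc hwa hla
    exact ⟨hm, hc, hwa, hla⟩
  | cons d t ih =>
    intro m os cA wA lA hm hc hwa hla
    simp only [List.foldl_cons]
    by_cases hcond : (pvInB X Y (ax + d.1) (ay + d.2) && pvHasA Y msk (ax + d.1) (ay + d.2)) = true
    · have hwm := hw m (ax + d.1) (ay + d.2) hm
      have hb := hv (ax + d.1) (ay + d.2)
      rw [if_pos hcond]
      rcases hw1 : (v (ax + d.1) (ay + d.2)).1 with _ | _
      · -- opponent loses: c ≤ 0, winning move for A
        have hcle : (w m (ax + d.1) (ay + d.2)).2 ≤ 0 := by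
          rw [hwm.1]; unfold pvEnc; rw [hw1]; simp; exact hb.1
        rw [pvStepA_win X Y ax ay msk v cA wA lA d hcond hw1]
        have henc : (w m (ax + d.1) (ay + d.2)).2 = -(v (ax + d.1) (ay + d.2)).2 := by
          rw [hwm.1]; unfold pvEnc; rw [hw1]; simp
        refine ih _ _ _ _ _ hwm.2 (by simp) ?_ ?_
        · rw [pvWinOf_append_le _ _ hcle, ← hwa, henc]
          congr 1; omega
        · rw [pvLoseOf_append_le _ _ hcle, hla]
      · -- opponent wins: c > 0, losing move for A
        have hcpos : 0 < (w m (ax + d.1) (ay + d.2)).2 := by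
          rw [hwm.1]; unfold pvEnc; rw [hw1]; simp; have := hb.2 hw1; omega
        rw [pvStepA_lose X Y ax ay msk v cA wA lA d hcond hw1]
        have henc : (w m (ax + d.1) (ay + d.2)).2 = (v (ax + d.1) (ay + d.2)).2 := by
          rw [hwm.1]; unfold pvEnc; rw [hw1]; simp
        refine ih _ _ _ _ _ hwm.2 (by simp) ?_ ?_
        · rw [pvWinOf_append_pos _ _ hcpos, hwa]
        · rw [pvLoseOf_append_pos _ _ hcpos, hla, henc]
    · rw [if_neg hcond,
        pvStepA_skip X Y ax ay msk v cA wA lA d (by simpa using hcond)]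
      exact ih _ _ _ _ _ hm hc hwa hla

-- B's combine (filter/max over the outcome list) equals the encoding of A's combine
theorem pvCombine (os : List Int) (lo : Int) (hlo : lo = pvLoseOf os) :
    (if (os.filter (fun v => decide (v ≤ 0))).isEmpty = false then
       1 - ((PySem.List.max? (os.filter (fun v => decide (v ≤ 0))) (fun x => x)).getD 0)
     else if os.isEmpty = false then
       -(((PySem.List.max? os (fun x => x)).getD 0) + 1)
     else 0) =
    pvEnc (if (!os.isEmpty) = false then (false, 0)
           else match pvWinOf os with
             | some w => (true, w)
             | none => (false, lo)) := by
  rcases hos : os.isEmpty with _ | _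
  · -- os nonempty
    rcases hl : (os.filter (fun v => decide (v ≤ 0))).isEmpty with _ | _
    · -- losses nonempty: a winning move exists
      have hne : os.filter (fun v => decide (v ≤ 0)) ≠ [] := by
        intro h; rw [h] at hl; simp at hl
      rcases hm : PySem.List.max? (os.filter (fun v => decide (v ≤ 0))) (fun x => x) with _ | m
      · exact absurd ((PySem.List.max?_eq_none_iff _ _).mp hm) hne
      · have hwof : pvWinOf os = some (1 - m) := by unfold pvWinOf; rw [hm]; rfl
        simp [hwof, pvEnc]
    · -- no losses: every move wins for the opponent
      have hfe : os.filter (fun v => decide (v ≤ 0)) = [] := by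
        cases h : os.filter (fun v => decide (v ≤ 0)) with
        | nil => rfl
        | cons x t => rw [h] at hl; simp at hl
      have hwof : pvWinOf os = none := by
        unfold pvWinOf; rw [hfe]; rfl
      have hall : ∀ v ∈ os, 0 < v := by
        intro v hv
        by_contra hnv
        have : v ∈ os.filter (fun v => decide (v ≤ 0)) := by
          rw [List.mem_filter]; exact ⟨hv, by simpa using le_of_not_gt hnv⟩
        rw [hfe] at this; simp at this
      have hfp : os.filter (fun v => decide (0 < v)) = os :=
        List.filter_eq_self.mpr (fun v hv => by simpa using hall v hv)
      have hne : os ≠ [] := by intro h; rw [h] at hos; simp at hos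
      rcases hm : PySem.List.max? os (fun x => x) with _ | m
      · exact absurd ((PySem.List.max?_eq_none_iff _ _).mp hm) hne
      · have hloval : pvLoseOf os = m + 1 := by unfold pvLoseOf; rw [hfp, hm]
        simp [hwof, pvEnc, hlo, hloval]
  · -- os empty: no move
    have : os = [] := by cases os with | nil => rfl | cons x t => simp at hos
    subst this
    simp [pvEnc]

theorem pvGameB_correct (X Y : Int) :
    ∀ (f : Nat) (m : PvMemoB) (ax ay bx b_y : Int) (msk : Nat), msk < f → pvInv X Y m →
      (pvGameB X Y f m ax ay bx b_y msk).2 = pvEnc (pvVal X Y ax ay bx b_y msk) ∧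
      pvInv X Y (pvGameB X Y f m ax ay bx b_y msk).1 := by
  intro f
  induction f with
  | zero => intro m ax ay bx b_y msk hf; omega
  | succ f ih =>
    intro m ax ay bx b_y msk hf hm
    simp only [pvGameB]
    by_cases h : pvTileB Y msk ax ay = false
    · -- no tile under the mover: both return (False, 0) / 0
      have hval : pvVal X Y ax ay bx b_y msk = (false, 0) := by
        unfold pvVal
        simp only [pvDfsA]
        rw [if_pos (by rw [← pvTileB_eq]; exact h)]
      rw [if_pos h]
      exact ⟨by rw [hval]; rfl, hm⟩
    · rw [if_neg h]
      have hhA : pvHasA Y msk ax ay = true := by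
        rw [← pvTileB_eq]; simpa using h
      rcases hg : m.get? (ax, ay, bx, b_y, msk) with _ | r
      · -- memo miss
        have hlt := pvClearA_lt Y msk ax ay hhA
        have hdrop : pvDropB Y msk ax ay = pvClearA Y msk ax ay := pvDropB_eq Y msk ax ay
        -- B's move list is A's direction list, shifted
        have hmoves : [(ax + 1, ay), (ax - 1, ay), (ax, ay + 1), (ax, ay - 1)] =
            pvDIRS.map (fun d => (ax + d.1, ay + d.2)) := by
          simp [pvDIRS]; omega
        have hguard : ∀ q : Int × Int,
            (decide (0 ≤ q.1 ∧ q.1 < X ∧ 0 ≤ q.2 ∧ q.2 < Y) && pvTileB Y msk q.1 q.2) =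
            (pvInB X Y q.1 q.2 && pvHasA Y msk q.1 q.2) := by
          intro q; rw [pvTileB_eq]; rfl
        have hfold := pvFoldAB X Y ax ay msk
          (fun nx ny => pvDfsA X Y f bx b_y nx ny (pvClearA Y msk ax ay))
          (fun m nx ny => pvGameB X Y f m bx b_y nx ny (pvClearA Y msk ax ay))
          (fun nx ny => pvDfsA_bounds X Y f bx b_y nx ny (pvClearA Y msk ax ay))
          (by
            intro m' nx ny hm'
            have h1 := ih m' bx b_y nx ny (pvClearA Y msk ax ay) (by omega) hm'
            refine ⟨?_, h1.2⟩
            rw [h1.1]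
            unfold pvVal
            congr 1
            exact pvDfsA_fuel X Y (pvClearA Y msk ax ay + 1) f bx b_y nx ny
              (pvClearA Y msk ax ay) (by omega) (by omega))
          pvDIRS m [] false none 0 hm (by simp) (by rfl) (by rfl)
        -- rewrite B's fold over moves into the fold over directions
        have hfoldeq :
            ([(ax + 1, ay), (ax - 1, ay), (ax, ay + 1), (ax, ay - 1)].foldl
              (fun (acc : PvMemoB × List Int) q =>
                if decide (0 ≤ q.1 ∧ q.1 < X ∧ 0 ≤ q.2 ∧ q.2 < Y) && pvTileB Y msk q.1 q.2 then
                  let r := pvGameB X Y f acc.1 bx b_y q.1 q.2 (pvDropB Y msk ax ay)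
                  (r.1, acc.2 ++ [r.2])
                else acc) (m, [])) =
            (pvDIRS.foldl (fun (acc : PvMemoB × List Int) d =>
              if (pvInB X Y (ax + d.1) (ay + d.2) && pvHasA Y msk (ax + d.1) (ay + d.2)) then
                ((fun m nx ny => pvGameB X Y f m bx b_y nx ny (pvClearA Y msk ax ay)) acc.1 (ax + d.1) (ay + d.2)).1 |> fun m' =>
                  (m', acc.2 ++ [((fun m nx ny => pvGameB X Y f m bx b_y nx ny (pvClearA Y msk ax ay)) acc.1 (ax + d.1) (ay + d.2)).2])
              else acc) (m, [])) := by
          rw [hmoves, List.foldl_map]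
          apply PySem.List.foldl_congr_mem
          intro acc d _
          rw [hguard ((ax + d.1, ay + d.2)), hdrop]
        rw [hfoldeq]
        set bacc := (pvDIRS.foldl (fun (acc : PvMemoB × List Int) d =>
              if (pvInB X Y (ax + d.1) (ay + d.2) && pvHasA Y msk (ax + d.1) (ay + d.2)) then
                ((fun m nx ny => pvGameB X Y f m bx b_y nx ny (pvClearA Y msk ax ay)) acc.1 (ax + d.1) (ay + d.2)).1 |> fun m' =>
                  (m', acc.2 ++ [((fun m nx ny => pvGameB X Y f m bx b_y nx ny (pvClearA Y msk ax ay)) acc.1 (ax + d.1) (ay + d.2)).2])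
              else acc) (m, [])) with hbacc
        obtain ⟨hInvB, hcm, hwin, hlose⟩ := hfold
        -- A's value at this state, in combine form
        have hval : pvVal X Y ax ay bx b_y msk =
            (if (!bacc.2.isEmpty) = false then (false, 0)
             else match pvWinOf bacc.2 with
               | some w => (true, w)
               | none => (false, pvLoseOf bacc.2)) := by
          unfold pvVal
          simp only [pvDfsA]
          rw [if_neg (by simp [hhA])]
          have hvfun : (fun nx ny => pvDfsA X Y msk bx b_y nx ny (pvClearA Y msk ax ay)) =
              (fun nx ny => pvDfsA X Y f bx b_y nx ny (pvClearA Y msk ax ay)) := by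
            funext nx ny
            exact pvDfsA_fuel X Y msk f bx b_y nx ny (pvClearA Y msk ax ay) (by omega) (by omega)
          rw [hvfun]
          set aacc := pvDIRS.foldl (pvStepA X Y ax ay msk (fun nx ny =>
            pvDfsA X Y f bx b_y nx ny (pvClearA Y msk ax ay))) (false, none, 0) with haacc
          rw [show aacc.1 = !bacc.2.isEmpty from hcm, show aacc.2.1 = pvWinOf bacc.2 from hwin,
            show aacc.2.2 = pvLoseOf bacc.2 from hlose]
        have hcomb := pvCombine bacc.2 (pvLoseOf bacc.2) rfl
        rw [← hval] at hcomb
        refine ⟨by simpa using hcomb, ?_⟩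
        exact pvInv_insert X Y bacc.1 ax ay bx b_y msk _ hInvB (by simpa using hcomb)
      · -- memo hit
        exact ⟨hm ax ay bx b_y msk r hg, hm⟩

-- ===== VERDICT (by name: the statement is the Claim_ definition above) =====
theorem solution_spec : Claim_equal_solution := by
  intro board aloc bloc _ _
  unfold Spec_solution
  show solution board aloc bloc = solution_alt board aloc bloc
  unfold solution solution_alt
  simp only [pvMaskB_eq]
  set X : Int := (board.length : Int)
  set Y : Int := (((PySem.List.pyGet? board 0).getD []).length : Int)
  set mask := pvMaskA board X Y
  set a0 := (PySem.List.pyGet? aloc 0).getD 0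
  set a1 := (PySem.List.pyGet? aloc 1).getD 0
  set b0 := (PySem.List.pyGet? bloc 0).getD 0
  set b1 := (PySem.List.pyGet? bloc 1).getD 0
  have h := pvGameB_correct X Y (mask + 1) PySem.Dict.empty a0 a1 b0 b1 mask
    (by omega) (pvInv_empty X Y)
  have hb := (pvDfsA_bounds X Y (mask + 1) a0 a1 b0 b1 mask).1
  show (pvDfsA X Y (mask + 1) a0 a1 b0 b1 mask).2 =
    |(pvGameB X Y (mask + 1) PySem.Dict.empty a0 a1 b0 b1 mask).2|
  rw [h.1]
  unfold pvEnc pvVal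
  split
  · rw [abs_of_nonneg hb]
  · rw [abs_neg, abs_of_nonneg hb]
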